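-- pv_equiv track=rewrite | github.com/Clement-Okolo/Vectorless-Rag | streamlit_app.py | get_page_images_for_nodes
-- ===== SOURCE A (Python) =====
-- from typing import Dict, List, Tuple
--
-- def get_page_images_for_nodes(
--     node_list: List[str], node_map: Dict, page_images: Dict[int, str]
-- ) -> List[str]:
--     image_paths = []
--     seen_pages = set()
--
--     for node_id in node_list:
--         if node_id not in node_map:
--             continue
--         node_info = node_map[node_id]
--         for page_num in range(node_info["start_index"], node_info["end_index"] + 1):
--             if page_num in page_images and page_num not in seen_pages:
--                 image_paths.append(page_images[page_num])
--                 seen_pages.add(page_num)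
--
--     return image_paths
-- ===== SOURCE B (Python) =====
-- def get_page_images_for_nodes(node_list, node_map, page_images):
--     # Stateless: page p belongs to node i iff i is the first node whose range
--     # covers p; emit per node, pages ascending. No seen-set, no range walk.
--     intervals = [(node_map[n]["start_index"], node_map[n]["end_index"])
--                  for n in node_list if n in node_map]
--     keys = sorted(page_images)
--     return [page_images[p]
--             for i, (s, e) in enumerate(intervals)
--             for p in keys
--             if s <= p <= e and not any(a <= p <= b for a, b in intervals[:i])]
-- ===== Notes on version B (the rewrite author's own statement) =====
-- stated objective: alternative
-- what changed: B is a stateless two-stage comprehension: it precomputes the node intervals, sorts the existing page numbers once, and emits page p under the FIRST interval covering it (tested via the earlier-intervals list), replacing A's mutable seen-set and per-page range walk.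
import Mathlib
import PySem

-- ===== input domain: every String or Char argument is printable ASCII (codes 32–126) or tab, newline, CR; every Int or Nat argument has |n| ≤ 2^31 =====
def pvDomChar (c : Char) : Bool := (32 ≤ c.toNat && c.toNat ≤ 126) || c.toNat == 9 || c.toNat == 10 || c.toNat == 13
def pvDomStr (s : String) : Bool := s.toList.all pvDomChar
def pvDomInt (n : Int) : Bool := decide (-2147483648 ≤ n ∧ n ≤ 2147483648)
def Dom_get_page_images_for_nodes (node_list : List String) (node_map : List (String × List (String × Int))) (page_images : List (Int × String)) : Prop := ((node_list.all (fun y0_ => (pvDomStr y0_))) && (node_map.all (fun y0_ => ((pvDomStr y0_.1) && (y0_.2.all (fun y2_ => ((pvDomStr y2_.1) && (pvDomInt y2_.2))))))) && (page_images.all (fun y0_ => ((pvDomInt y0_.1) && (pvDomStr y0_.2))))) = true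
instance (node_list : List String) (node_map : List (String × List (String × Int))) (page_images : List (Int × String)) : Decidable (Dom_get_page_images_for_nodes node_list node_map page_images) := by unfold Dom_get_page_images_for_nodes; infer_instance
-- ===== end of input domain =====

-- B replaces A's mutable seen-set and integer range walk by a stateless two-stage
-- comprehension: intervals list + sorted existing page keys, a page emitted under the
-- first interval that covers it (membership in earlier intervals recomputed, not cached).


-- ===== PORT A =====
def get_page_images_for_nodes (node_list : List String) (node_map : List (String × List (String × Int))) (page_images : List (Int × String)) : List String :=
  let nmap := PySem.Dict.ofList node_map
  let pages := PySem.Dict.ofList page_images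
  let r := node_list.foldl (fun (acc : List String × PySem.Set Int) node_id =>
    match nmap.get? node_id with
    | none => acc                       -- 'if node_id not in node_map: continue'
    | some infoRaw =>
      let info := PySem.Dict.ofList infoRaw
      let s := info.getD "start_index" 0   -- total form of node_info["start_index"]; key present under Pre_
      let e := info.getD "end_index" 0     -- total form of node_info["end_index"]; key present under Pre_
      (PySem.List.pyRange s (e + 1) 1).foldl (fun acc page_num =>
        if pages.contains page_num && !(PySem.Set.contains acc.2 page_num) then
          (acc.1 ++ [pages.getD page_num ""], PySem.Set.add acc.2 page_num)
        else acc) acc) ([], PySem.Set.empty)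
  r.1

-- ===== PORT B =====
-- helper: 'any(a <= p <= b for a, b in ivs)'
def pvCov (ivs : List (Int × Int)) (p : Int) : Bool :=
  ivs.any (fun q => decide (q.1 ≤ p) && decide (p ≤ q.2))

def get_page_images_for_nodes_alt (node_list : List String) (node_map : List (String × List (String × Int))) (page_images : List (Int × String)) : List String :=
  let nmap := PySem.Dict.ofList node_map
  -- intervals = [(node_map[n]["start_index"], node_map[n]["end_index"]) for n in node_list if n in node_map]
  let intervals := node_list.filterMap (fun n =>
    (nmap.get? n).map (fun info =>
      ((PySem.Dict.ofList info).getD "start_index" 0,    -- key present under Pre_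
       (PySem.Dict.ofList info).getD "end_index" 0)))
  let pages := PySem.Dict.ofList page_images
  let keys := PySem.List.sorted pages.keys (fun x => x) false   -- keys = sorted(page_images)
  (PySem.List.enumerate intervals).flatMap (fun ie =>
    (keys.filter (fun p =>
        (decide (ie.2.1 ≤ p) && decide (p ≤ ie.2.2)) &&
        !pvCov (PySem.List.slice intervals none (some ie.1)) p)).map
      (fun p => pages.getD p ""))                         -- p is a key of page_images, so getD never defaults

-- ===== PRECONDITION & SPEC =====
-- Pre_ excludes exactly the inputs on which A raises KeyError: a node id of node_list that is
-- in node_map whose info dict lacks "start_index" or "end_index".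
def Pre_get_page_images_for_nodes (node_list : List String) (node_map : List (String × List (String × Int))) (page_images : List (Int × String)) : Prop :=
  (node_list.all (fun nid =>
    match (PySem.Dict.ofList node_map).get? nid with
    | none => true
    | some infoRaw =>
      (PySem.Dict.ofList infoRaw).contains "start_index" &&
      (PySem.Dict.ofList infoRaw).contains "end_index")) = true
instance (node_list : List String) (node_map : List (String × List (String × Int))) (page_images : List (Int × String)) : Decidable (Pre_get_page_images_for_nodes node_list node_map page_images) := by unfold Pre_get_page_images_for_nodes; infer_instance

def pvWitness_get_page_images_for_nodes : List String × (List (String × List (String × Int))) × (List (Int × String)) :=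
  (["n1", "n2"], [("n1", [("start_index", 1), ("end_index", 3)])], [(3, "p3.png"), (1, "p1.png")])

def Spec_get_page_images_for_nodes (node_list : List String) (node_map : List (String × List (String × Int))) (page_images : List (Int × String)) (out : List String) : Prop := out = get_page_images_for_nodes_alt node_list node_map page_images
instance (node_list : List String) (node_map : List (String × List (String × Int))) (page_images : List (Int × String)) (out : List String) : Decidable (Spec_get_page_images_for_nodes node_list node_map page_images out) := by unfold Spec_get_page_images_for_nodes; infer_instance

-- ===== CLAIM (what is proved, stated in full; the proofs are below) =====
def Claim_equal_get_page_images_for_nodes : Prop := ∀ (node_list : List String) (node_map : List (String × List (String × Int))) (page_images : List (Int × String)), Dom_get_page_images_for_nodes node_list node_map page_images → Pre_get_page_images_for_nodes node_list node_map page_images → Spec_get_page_images_for_nodes node_list node_map page_images (get_page_images_for_nodes node_list node_map page_images)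

-- ===== LEMMAS AND PROOFS =====

-- A's inner loop body
def pvStepIn (pages : PySem.Dict Int String) (acc : List String × PySem.Set Int) (p : Int) : List String × PySem.Set Int :=
  if pages.contains p && !(PySem.Set.contains acc.2 p) then
    (acc.1 ++ [pages.getD p ""], PySem.Set.add acc.2 p)
  else acc

-- B's per-node segment (the inner comprehension for one (s,e) with earlier intervals prev)
def pvSeg (pages : PySem.Dict Int String) (keys : List Int) (prev : List (Int × Int)) (s e : Int) : List String :=
  (keys.filter (fun p => (decide (s ≤ p) && decide (p ≤ e)) && !pvCov prev p)).map
    (fun p => pages.getD p "")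

-- B's output, node by node, carrying the list of earlier intervals
def pvFlatB (pages : PySem.Dict Int String) (keys : List Int) : List (Int × Int) → List (Int × Int) → List String
  | _, [] => []
  | prev, iv :: t => pvSeg pages keys prev iv.1 iv.2 ++ pvFlatB pages keys (prev ++ [iv]) t

lemma pvA_fold (nmap : PySem.Dict String (List (String × Int))) (pages : PySem.Dict Int String) :
    ∀ (nl : List String) (acc : List String × PySem.Set Int),
    nl.foldl (fun acc node_id =>
      match nmap.get? node_id with
      | none => acc
      | some infoRaw =>
        (PySem.List.pyRange ((PySem.Dict.ofList infoRaw).getD "start_index" 0)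
            ((PySem.Dict.ofList infoRaw).getD "end_index" 0 + 1) 1).foldl (pvStepIn pages) acc) acc
    = (nl.filterMap (fun n =>
        (nmap.get? n).map (fun info =>
          ((PySem.Dict.ofList info).getD "start_index" 0,
           (PySem.Dict.ofList info).getD "end_index" 0)))).foldl
        (fun acc iv => (PySem.List.pyRange iv.1 (iv.2 + 1) 1).foldl (pvStepIn pages) acc) acc := by
  intro nl
  induction nl with
  | nil => intro acc; rfl
  | cons n t ih =>
    intro acc
    cases h : nmap.get? n with
    | none => simp [h, ih]
    | some infoRaw => simp [h, ih]

lemma pvSeg_fold (pages : PySem.Dict Int String) :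
    ∀ (l : List Int), l.Nodup → ∀ (o : List String) (S : PySem.Set Int),
    (l.foldl (pvStepIn pages) (o, S)).1
        = o ++ (l.filter (fun p => pages.contains p && !(PySem.Set.contains S p))).map
            (fun p => pages.getD p "")
    ∧ ∀ q : Int, PySem.Set.contains (l.foldl (pvStepIn pages) (o, S)).2 q
        = (PySem.Set.contains S q || (pages.contains q && decide (q ∈ l))) := by
  intro l
  induction l with
  | nil => intro _ o S; simp
  | cons p t ih =>
    intro hnd o S
    obtain ⟨hp, hndt⟩ := List.nodup_cons.mp hnd
    have hadd : ∀ q : Int, PySem.Set.contains (PySem.Set.add S p) q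
        = (PySem.Set.contains S q || decide (q = p)) := by
      intro q
      rw [Bool.eq_iff_iff]
      simp only [Bool.or_eq_true, PySem.Set.contains_iff, decide_eq_true_eq, PySem.Set.mem_add]
      try tauto
    by_cases hc : (pages.contains p && !(PySem.Set.contains S p)) = true
    · have hstep : pvStepIn pages (o, S) p
          = (o ++ [pages.getD p ""], PySem.Set.add S p) := by
        unfold pvStepIn; rw [if_pos hc]
      have hcp : pages.contains p = true := by
        cases h1 : pages.contains p
        · rw [h1] at hc; simp at hc
        · rfl
      obtain ⟨ih1, ih2⟩ := ih hndt (o ++ [pages.getD p ""]) (PySem.Set.add S p)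
      constructor
      · have hfil : t.filter (fun x => pages.contains x && !(PySem.Set.contains (PySem.Set.add S p) x))
            = t.filter (fun x => pages.contains x && !(PySem.Set.contains S x)) := by
          apply List.filter_congr
          intro x hx
          have hxp : x ≠ p := fun h => hp (h ▸ hx)
          simp [hxp]
        simp only [List.foldl_cons, hstep, ih1, hfil, List.filter_cons, hc]
        simp
      · intro q
        simp only [List.foldl_cons, hstep, ih2 q, hadd q]
        by_cases h : q = p
        · subst h; simp [hcp]
        · simp [h]
    · have hstep : pvStepIn pages (o, S) p = (o, S) := by
        unfold pvStepIn; rw [if_neg hc]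
      have hcf : (pages.contains p && !(PySem.Set.contains S p)) = false :=
        Bool.eq_false_iff.mpr hc
      obtain ⟨ih1, ih2⟩ := ih hndt o S
      constructor
      · simp only [List.foldl_cons, hstep, ih1, List.filter_cons, hcf]
        simp
      · intro q
        simp only [List.foldl_cons, hstep, ih2 q]
        by_cases h : q = p
        · subst h
          cases h1 : pages.contains q
          · simp
          · rw [h1] at hcf; simp at hcf
            simp [hcf]
        · simp [h]

-- the two per-node page lists coincide: pages of [s,e] not covered earlier, ascending
lemma pv_filter_eq (pages : PySem.Dict Int String) (hnd : pages.keys.Nodup)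
    (prev : List (Int × Int)) (s e : Int) :
    (PySem.List.pyRange s (e + 1) 1).filter (fun p => pages.contains p && !pvCov prev p)
      = (PySem.List.sorted pages.keys (fun x => x) false).filter
          (fun p => (decide (s ≤ p) && decide (p ≤ e)) && !pvCov prev p) := by
  apply List.Perm.eq_of_pairwise (le := fun a b : Int => a < b)
    (fun a b _ _ h1 h2 => absurd h2 (by omega))
  · exact List.Pairwise.filter _ (PySem.List.pairwise_lt_pyRange_one s (e + 1))
  · apply List.Pairwise.filter
    have hle : (PySem.List.sorted pages.keys (fun x => x) false).Pairwise (· ≤ ·) :=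
      PySem.List.sorted_pairwise pages.keys (fun x => x)
    have hnd' : (PySem.List.sorted pages.keys (fun x => x) false).Nodup :=
      (PySem.List.sorted_perm pages.keys (fun x => x) false).symm.nodup hnd
    exact (hle.and hnd').imp (fun h => lt_of_le_of_ne h.1 h.2)
  · refine (List.perm_ext_iff_of_nodup
        ((PySem.List.nodup_pyRange_one s (e + 1)).filter _)
        (((PySem.List.sorted_perm pages.keys (fun x => x) false).symm.nodup hnd).filter _)).mpr ?_
    intro x
    simp only [List.mem_filter, PySem.List.mem_pyRange_one, PySem.List.mem_sorted,
      Bool.and_eq_true, decide_eq_true_eq, ← PySem.Dict.contains_iff_mem_keys]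
    constructor
    · rintro ⟨⟨h1, h2⟩, h3, h4⟩; exact ⟨h3, ⟨by omega, by omega⟩, h4⟩
    · rintro ⟨h3, ⟨h1, h2⟩, h4⟩; exact ⟨⟨by omega, by omega⟩, h3, h4⟩

lemma pvOuter (pages : PySem.Dict Int String) (hnd : pages.keys.Nodup) :
    ∀ (ivs prev : List (Int × Int)) (o : List String) (S : PySem.Set Int),
    (∀ q, PySem.Set.contains S q = (pages.contains q && pvCov prev q)) →
    (ivs.foldl (fun acc iv => (PySem.List.pyRange iv.1 (iv.2 + 1) 1).foldl (pvStepIn pages) acc) (o, S)).1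
      = o ++ pvFlatB pages (PySem.List.sorted pages.keys (fun x => x) false) prev ivs := by
  intro ivs
  induction ivs with
  | nil => intro prev o S _; simp [pvFlatB]
  | cons iv t ih =>
    intro prev o S hS
    obtain ⟨h1, h2⟩ := pvSeg_fold pages (PySem.List.pyRange iv.1 (iv.2 + 1) 1)
      (PySem.List.nodup_pyRange_one iv.1 (iv.2 + 1)) o S
    set acc' := (PySem.List.pyRange iv.1 (iv.2 + 1) 1).foldl (pvStepIn pages) (o, S) with hacc
    have hS' : ∀ q, PySem.Set.contains acc'.2 q
        = (pages.contains q && pvCov (prev ++ [iv]) q) := by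
      intro q
      rw [h2 q, hS q]
      simp only [pvCov, List.any_append, List.any_cons, List.any_nil]
      by_cases hq : (iv.1 ≤ q ∧ q ≤ iv.2)
      · have : decide (q ∈ PySem.List.pyRange iv.1 (iv.2 + 1) 1) = true := by
          simp [PySem.List.mem_pyRange_one]; omega
        simp only [this]
        cases pages.contains q <;> simp [hq.1, hq.2]
      · have : decide (q ∈ PySem.List.pyRange iv.1 (iv.2 + 1) 1) = false := by
          simp [PySem.List.mem_pyRange_one]; omega
        have h' : (decide (iv.1 ≤ q) && decide (q ≤ iv.2)) = false := by
          rcases not_and_or.mp hq with h | h <;> simp [h]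
        simp only [this, h']
        cases pages.contains q <;> simp
    have hseg : acc'.1 = o ++ pvSeg pages (PySem.List.sorted pages.keys (fun x => x) false) prev iv.1 iv.2 := by
      rw [hacc, h1]
      congr 1
      unfold pvSeg
      congr 1
      rw [← pv_filter_eq pages hnd prev iv.1 iv.2]
      apply List.filter_congr
      intro x _
      rw [hS x]
      cases hc : pages.contains x <;> simp
    have hsplit : (iv :: t).foldl (fun acc iv => (PySem.List.pyRange iv.1 (iv.2 + 1) 1).foldl (pvStepIn pages) acc) (o, S)
        = t.foldl (fun acc iv => (PySem.List.pyRange iv.1 (iv.2 + 1) 1).foldl (pvStepIn pages) acc) acc' := by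
      simp [hacc]
    rw [hsplit]
    have := ih (prev ++ [iv]) acc'.1 acc'.2 hS'
    rw [show (acc'.1, acc'.2) = acc' from rfl] at this
    rw [this, hseg, pvFlatB, List.append_assoc]

lemma pvEnum (pages : PySem.Dict Int String) (keys : List Int) (all : List (Int × Int)) :
    ∀ (suf pre : List (Int × Int)), all = pre ++ suf →
    (PySem.List.enumerate suf (pre.length : Int)).flatMap
      (fun ie => (keys.filter (fun p =>
          (decide (ie.2.1 ≤ p) && decide (p ≤ ie.2.2)) &&
          !pvCov (PySem.List.slice all none (some ie.1)) p)).map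
        (fun p => pages.getD p ""))
    = pvFlatB pages keys pre suf := by
  intro suf
  induction suf with
  | nil => intro pre _; simp [PySem.List.enumerate_nil, pvFlatB]
  | cons iv t ih =>
    intro pre hall
    rw [PySem.List.enumerate_cons, List.flatMap_cons, pvFlatB]
    congr 1
    · have hslice : PySem.List.slice all none (some (pre.length : Int)) = pre := by
        rw [PySem.List.slice_to_natCast, hall, List.take_left]
      rw [hslice]; rfl
    · have hlen : ((pre.length : Int) + 1) = (((pre ++ [iv]).length : Nat) : Int) := by
        push_cast [List.length_append, List.length_cons, List.length_nil]; ring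
      rw [hlen]
      exact ih (pre ++ [iv]) (by simp [hall])

-- ===== VERDICT (by name: the statement is the Claim_ definition above) =====
theorem get_page_images_for_nodes_spec : Claim_equal_get_page_images_for_nodes := by
  intro node_list node_map page_images _ _
  unfold Spec_get_page_images_for_nodes
  simp only [get_page_images_for_nodes, get_page_images_for_nodes_alt]
  rw [show (fun (acc : List String × PySem.Set Int) (page_num : Int) =>
      if (PySem.Dict.ofList page_images).contains page_num && !(PySem.Set.contains acc.2 page_num) then
        (acc.1 ++ [(PySem.Dict.ofList page_images).getD page_num ""], PySem.Set.add acc.2 page_num)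
      else acc) = pvStepIn (PySem.Dict.ofList page_images) from rfl]
  rw [pvA_fold]
  rw [pvOuter (PySem.Dict.ofList page_images) (PySem.Dict.nodup_keys_ofList page_images)
      _ [] [] PySem.Set.empty (by intro q; simp [pvCov, PySem.Set.contains_eq_listContains, PySem.Set.empty])]
  rw [← pvEnum (PySem.Dict.ofList page_images) _ _ _ [] rfl]
  simp
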